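-- pv_equiv track=rewrite | github.com/gaoliangs/MLRE | preprocessing.py | merge_marker
-- ===== SOURCE A (Python) =====
-- def merge_marker(group,taxaname,data):
-- 	seq =[]
-- 	for g in group:
-- 		loc = taxaname.index(g)
-- 		seq.append(data[loc])
--
--
-- 	merged_sequence = [
--     '?' if set(chars) == {'?'} else
--     '1' if '0' not in chars else
--     '0' if '1' not in chars else
--     'B' if set(chars) in ({'0', '1'}, {'0', '1', '?'}) else
--     '?' for chars in zip(*seq)
-- 	]
--
-- 	return ''.join(merged_sequence)
-- ===== SOURCE B (Python) =====
-- def _upd(f, c):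
--     h0, h1, hq, ho = f
--     if c == '0':
--         return (True, h1, hq, ho)
--     if c == '1':
--         return (h0, True, hq, ho)
--     if c == '?':
--         return (h0, h1, True, ho)
--     return (h0, h1, hq, True)
--
--
-- def _emit(f):
--     h0, h1, hq, ho = f
--     if hq and not (h0 or h1 or ho):
--         return '?'
--     if not h0:
--         return '1'
--     if not h1:
--         return '0'
--     return 'B' if not ho else '?'
--
--
-- def merge_marker(group, taxaname, data):
--     seq = [data[taxaname.index(g)] for g in group]
--     if not seq:
--         return ''
--     flags = [(False, False, False, False)] * len(seq[0])
--     for s in seq: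
--         flags = [_upd(f, c) for f, c in zip(flags, s)]
--     return ''.join(_emit(f) for f in flags)
-- ===== Notes on version B (the rewrite author's own statement) =====
-- stated objective: alternative
-- what changed: Replaces the zip(*seq) transpose with per-column set construction by a single row-major pass that accumulates four presence flags (has '0'/'1'/'?'/other) per column via zip truncation and emits each output character from the flags.
import Mathlib
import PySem

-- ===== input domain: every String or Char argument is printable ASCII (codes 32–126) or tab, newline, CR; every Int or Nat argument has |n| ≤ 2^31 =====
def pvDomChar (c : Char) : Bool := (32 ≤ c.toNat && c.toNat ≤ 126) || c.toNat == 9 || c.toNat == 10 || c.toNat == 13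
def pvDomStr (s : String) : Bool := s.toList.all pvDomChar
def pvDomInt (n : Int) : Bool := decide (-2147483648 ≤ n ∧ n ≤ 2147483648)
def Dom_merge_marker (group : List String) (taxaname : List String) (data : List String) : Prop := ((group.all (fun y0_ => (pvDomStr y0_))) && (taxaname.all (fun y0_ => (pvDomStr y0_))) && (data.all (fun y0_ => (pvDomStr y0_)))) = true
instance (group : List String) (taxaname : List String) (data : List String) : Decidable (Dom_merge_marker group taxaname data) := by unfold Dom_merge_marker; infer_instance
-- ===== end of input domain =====

-- B replaces A's zip(*seq) transpose-and-set-per-column with one row-major pass accumulating four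
-- presence flags per column; same return value on every input where A returns (Pre_), no speed claim.

-- ===== PORT A =====
-- data[taxaname.index(g)] : index? = taxaname.index (none = ValueError), pyGet? = data[loc] (none = IndexError);
-- the .getD "" default is reached only outside Pre_merge_marker, where the Python raises.
def pvLook (taxaname : List String) (data : List String) (g : String) : String :=
  ((PySem.List.index? taxaname g).bind (fun loc => PySem.List.pyGet? data (loc : Int))).getD ""

-- zip(*seq): columns j < min length, column j in row order; r.getD j ' ' is exact since j < every row's length
def pvCols (rows : List (List Char)) : List (List Char) :=
  match rows with
  | [] => []
  | r :: rs =>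
    (List.range (rs.foldl (fun m s => min m s.length) r.length)).map
      (fun j => (r :: rs).map (fun s => s.getD j ' '))

-- the conditional expression of A's list comprehension, branch for branch (set(chars) == … is Set.equal)
def pvColCharA (chars : List Char) : Char :=
  if PySem.Set.equal (PySem.Set.ofList chars) ['?'] then '?'
  else if !(chars.contains '0') then '1'
  else if !(chars.contains '1') then '0'
  else if PySem.Set.equal (PySem.Set.ofList chars) ['0', '1'] ||
          PySem.Set.equal (PySem.Set.ofList chars) ['0', '1', '?'] then 'B'
  else '?'

def merge_marker (group : List String) (taxaname : List String) (data : List String) : String :=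
  let seq := group.foldl (fun acc g => acc ++ [pvLook taxaname data g]) []
  String.ofList ((pvCols (seq.map String.toList)).map pvColCharA)

-- ===== PORT B =====
-- _upd: set the flag of c's class
def pvUpd (f : Bool × Bool × Bool × Bool) (c : Char) : Bool × Bool × Bool × Bool :=
  if c = '0' then (true, f.2.1, f.2.2.1, f.2.2.2)
  else if c = '1' then (f.1, true, f.2.2.1, f.2.2.2)
  else if c = '?' then (f.1, f.2.1, true, f.2.2.2)
  else (f.1, f.2.1, f.2.2.1, true)

-- _emit: flags → merged character
def pvEmit (f : Bool × Bool × Bool × Bool) : Char :=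
  if f.2.2.1 && !(f.1 || f.2.1 || f.2.2.2) then '?'
  else if !f.1 then '1'
  else if !f.2.1 then '0'
  else if !f.2.2.2 then 'B'
  else '?'

def merge_marker_alt (group : List String) (taxaname : List String) (data : List String) : String :=
  match group.map (fun g => pvLook taxaname data g) with
  | [] => ""
  | s0 :: rest =>
    let flags := (s0 :: rest).foldl
      (fun fl s => (fl.zip s.toList).map (fun p => pvUpd p.1 p.2))
      (List.replicate s0.length (false, false, false, false))
    String.ofList (flags.map pvEmit)

-- ===== PRECONDITION & SPEC =====
-- Pre_ excludes exactly the inputs where A raises: a group member absent from taxaname (ValueError)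
-- or whose taxaname index is out of range for data (IndexError).
def Pre_merge_marker (group : List String) (taxaname : List String) (data : List String) : Prop :=
  ∀ g ∈ group, g ∈ taxaname ∧ taxaname.idxOf g < data.length
instance (group : List String) (taxaname : List String) (data : List String) : Decidable (Pre_merge_marker group taxaname data) := by unfold Pre_merge_marker; infer_instance

def pvWitness_merge_marker : List String × List String × List String :=
  (["a", "b", "a"], ["a", "b"], ["01?", "1?0"])

def Spec_merge_marker (group : List String) (taxaname : List String) (data : List String) (out : String) : Prop := out = merge_marker_alt group taxaname data
instance (group : List String) (taxaname : List String) (data : List String) (out : String) : Decidable (Spec_merge_marker group taxaname data out) := by unfold Spec_merge_marker; infer_instance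

-- ===== CLAIM (what is proved, stated in full; the proofs are below) =====
def Claim_equal_merge_marker : Prop := ∀ (group : List String) (taxaname : List String) (data : List String), Dom_merge_marker group taxaname data → Pre_merge_marker group taxaname data → Spec_merge_marker group taxaname data (merge_marker group taxaname data)

-- ===== LEMMAS AND PROOFS =====

-- A's append loop builds the same seq as B's map
lemma pv_foldl_append_map (f : String → String) (group : List String) :
    ∀ l : List String, group.foldl (fun acc g => acc ++ [f g]) l = l ++ group.map f := by
  induction group with
  | nil => simp
  | cons g gs ih => intro l; simp [List.foldl_cons, ih]

lemma pv_map_range_getD {α : Type} (l : List α) (d : α) :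
    (List.range l.length).map (fun j => l.getD j d) = l := by
  apply List.ext_getElem
  · simp
  · intro i h1 h2
    simp [List.getD_eq_getElem?_getD, List.getElem?_eq_getElem h2]

lemma pv_foldl_min_le (rs : List (List Char)) : ∀ a : Nat,
    rs.foldl (fun m r => min m r.length) a ≤ a := by
  induction rs with
  | nil => intro a; simp
  | cons r rs ih =>
    intro a
    calc (r :: rs).foldl (fun m r => min m r.length) a
        = rs.foldl (fun m r => min m r.length) (min a r.length) := rfl
      _ ≤ min a r.length := ih _
      _ ≤ a := min_le_left _ _

-- the row-major flag fold computes, per column, the fold of pvUpd over that column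
lemma pv_flags_fold (rows : List (List Char)) :
    ∀ init : List (Bool × Bool × Bool × Bool),
    rows.foldl (fun fl r => (fl.zip r).map (fun p => pvUpd p.1 p.2)) init
      = (List.range (rows.foldl (fun m r => min m r.length) init.length)).map
          (fun j => (rows.map (fun r => r.getD j ' ')).foldl pvUpd
            (init.getD j (false, false, false, false))) := by
  induction rows with
  | nil =>
    intro init
    simp only [List.foldl_nil]
    exact (pv_map_range_getD init _).symm
  | cons r rs ih =>
    intro init
    rw [List.foldl_cons, ih]
    have hlen : ((init.zip r).map (fun p => pvUpd p.1 p.2)).length = min init.length r.length := by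
      simp
    rw [hlen]
    have hb : rs.foldl (fun m r => min m r.length) (min init.length r.length)
        = (r :: rs).foldl (fun m r => min m r.length) init.length := rfl
    rw [hb]
    apply List.map_congr_left
    intro j hj
    have hjlt : j < (r :: rs).foldl (fun m r => min m r.length) init.length := List.mem_range.mp hj
    have hle := pv_foldl_min_le rs (min init.length r.length)
    have hji : j < init.length := lt_of_lt_of_le hjlt (le_trans hle (min_le_left _ _))
    have hjr : j < r.length := lt_of_lt_of_le hjlt (le_trans hle (min_le_right _ _))
    have hz : ((init.zip r).map (fun p => pvUpd p.1 p.2)).getD j (false, false, false, false)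
        = pvUpd (init.getD j (false, false, false, false)) (r.getD j ' ') := by
      have hjz : j < ((init.zip r).map (fun p => pvUpd p.1 p.2)).length := by
        simp [hji, hjr]
      rw [List.getD_eq_getElem _ _ hjz, List.getD_eq_getElem _ _ hji, List.getD_eq_getElem _ _ hjr]
      simp [List.getElem_zip]
    rw [hz]
    simp [List.foldl_cons]

-- the flag fold over a column records exactly which character classes occur in it
lemma pv_upd_foldl (chars : List Char) : ∀ f : Bool × Bool × Bool × Bool,
    chars.foldl pvUpd f
      = (f.1 || chars.contains '0', f.2.1 || chars.contains '1', f.2.2.1 || chars.contains '?',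
         f.2.2.2 || chars.any (fun c => !(c == '0' || c == '1' || c == '?'))) := by
  induction chars with
  | nil => intro f; simp
  | cons c cs ih =>
    intro f
    rw [List.foldl_cons, ih]
    by_cases h0 : c = '0'
    · subst h0; simp [pvUpd, Bool.or_assoc]
    · by_cases h1 : c = '1'
      · subst h1; simp [pvUpd, Bool.or_assoc]
      · by_cases hq : c = '?'
        · subst hq; simp [pvUpd, Bool.or_assoc]
        · have h0' : ('0' : Char) ≠ c := fun h => h0 h.symm
          have h1' : ('1' : Char) ≠ c := fun h => h1 h.symm
          have hq' : ('?' : Char) ≠ c := fun h => hq h.symm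
          simp [pvUpd, h0, h1, hq, h0', h1', hq', Bool.or_assoc]

-- Set.equal of set(l) against a literal set, by membership
lemma pv_set_equal_iff (l t : List Char) :
    PySem.Set.equal (PySem.Set.ofList l) t = true ↔ (∀ x : Char, x ∈ l ↔ x ∈ t) := by
  rw [PySem.Set.equal_iff]
  constructor <;> intro h x <;> simpa [PySem.Set.mem_ofList] using h x

-- per (nonempty) column, A's conditional expression equals emit-of-flags
lemma pv_colA_eq (chars : List Char) (hne : chars ≠ []) :
    pvColCharA chars = pvEmit (chars.foldl pvUpd (false, false, false, false)) := by
  rw [pv_upd_foldl]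
  by_cases HO : ∃ c ∈ chars, c ≠ '0' ∧ c ≠ '1' ∧ c ≠ '?'
  · -- some character outside {'0','1','?'} occurs
    have ha : (chars.any fun c => !(c == '0' || c == '1' || c == '?')) = true := by
      obtain ⟨c, hc, h⟩ := HO
      simp only [List.any_eq_true]
      exact ⟨c, hc, by simp [h.1, h.2.1, h.2.2]⟩
    obtain ⟨c, hc, hc0, hc1, hcq⟩ := HO
    have e1 : PySem.Set.equal (PySem.Set.ofList chars) ['?'] = false := by
      rw [Bool.eq_false_iff]; intro h; rw [pv_set_equal_iff] at h
      exact hcq (by simpa using (h c).mp hc)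
    have e2 : PySem.Set.equal (PySem.Set.ofList chars) ['0', '1'] = false := by
      rw [Bool.eq_false_iff]; intro h; rw [pv_set_equal_iff] at h
      rcases (by simpa using (h c).mp hc : c = '0' ∨ c = '1') with h' | h' <;> simp_all
    have e3 : PySem.Set.equal (PySem.Set.ofList chars) ['0', '1', '?'] = false := by
      rw [Bool.eq_false_iff]; intro h; rw [pv_set_equal_iff] at h
      rcases (by simpa using (h c).mp hc : c = '0' ∨ c = '1' ∨ c = '?') with h' | h' | h' <;>
        simp_all
    have ha' : ∃ x ∈ chars, ¬x = '0' ∧ ¬x = '1' ∧ ¬x = '?' := ⟨c, hc, hc0, hc1, hcq⟩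
    by_cases H0 : '0' ∈ chars <;> by_cases H1 : '1' ∈ chars <;>
      simp [pvColCharA, pvEmit, e1, e2, e3, ha, ha', H0, H1]
  · -- every character is '0', '1' or '?'
    have hK : ∀ c ∈ chars, c = '0' ∨ c = '1' ∨ c = '?' := by
      intro c hc
      by_cases a0 : c = '0'
      · exact Or.inl a0
      by_cases a1 : c = '1'
      · exact Or.inr (Or.inl a1)
      by_cases aq : c = '?'
      · exact Or.inr (Or.inr aq)
      exact absurd ⟨c, hc, a0, a1, aq⟩ HO
    have ha : (chars.any fun c => !(c == '0' || c == '1' || c == '?')) = false := by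
      rw [List.any_eq_false]
      intro c hc
      rcases hK c hc with h | h | h <;> simp [h]
    have ha' : ∀ x ∈ chars, ¬x = '0' → ¬x = '1' → x = '?' := fun x hx h0 h1 =>
      ((hK x hx).resolve_left h0).resolve_left h1
    by_cases H0 : '0' ∈ chars <;> by_cases H1 : '1' ∈ chars <;> by_cases HQ : '?' ∈ chars
    · -- 0,1,? all occur: A takes the 'B' branch via {'0','1','?'}
      have e3 : PySem.Set.equal (PySem.Set.ofList chars) ['0', '1', '?'] = true := by
        rw [pv_set_equal_iff]
        intro x
        constructor
        · intro hx; simpa using hK x hx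
        · intro hx; rcases (by simpa using hx : x = '0' ∨ x = '1' ∨ x = '?') with h | h | h <;>
            subst h <;> assumption
      have e1 : PySem.Set.equal (PySem.Set.ofList chars) ['?'] = false := by
        rw [Bool.eq_false_iff]; intro h; rw [pv_set_equal_iff] at h
        simpa using (h '0').mp H0
      simp [pvColCharA, pvEmit, e1, e3, ha, ha', H0, H1, HQ] <;> exact ha'
    · -- 0,1 occur, '?' does not: A takes the 'B' branch via {'0','1'}
      have e2 : PySem.Set.equal (PySem.Set.ofList chars) ['0', '1'] = true := by
        rw [pv_set_equal_iff]
        intro x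
        constructor
        · intro hx
          rcases hK x hx with h | h | h
          · simp [h]
          · simp [h]
          · exact absurd (h ▸ hx) HQ
        · intro hx; rcases (by simpa using hx : x = '0' ∨ x = '1') with h | h <;>
            subst h <;> assumption
      have e1 : PySem.Set.equal (PySem.Set.ofList chars) ['?'] = false := by
        rw [Bool.eq_false_iff]; intro h; rw [pv_set_equal_iff] at h
        simpa using (h '0').mp H0
      simp [pvColCharA, pvEmit, e1, e2, ha, ha', H0, H1, HQ] <;> exact ha'
    · -- '0' occurs, '1' does not: both give '0'
      have e1 : PySem.Set.equal (PySem.Set.ofList chars) ['?'] = false := by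
        rw [Bool.eq_false_iff]; intro h; rw [pv_set_equal_iff] at h
        simpa using (h '0').mp H0
      simp [pvColCharA, pvEmit, e1, ha, ha', H0, H1, HQ] <;> exact ha'
    · have e1 : PySem.Set.equal (PySem.Set.ofList chars) ['?'] = false := by
        rw [Bool.eq_false_iff]; intro h; rw [pv_set_equal_iff] at h
        simpa using (h '0').mp H0
      simp [pvColCharA, pvEmit, e1, ha, ha', H0, H1, HQ] <;> exact ha'
    · -- '1' occurs, '0' does not: both give '1'
      have e1 : PySem.Set.equal (PySem.Set.ofList chars) ['?'] = false := by
        rw [Bool.eq_false_iff]; intro h; rw [pv_set_equal_iff] at h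
        simpa using (h '1').mp H1
      simp [pvColCharA, pvEmit, e1, ha, ha', H0, H1, HQ] <;> exact ha'
    · have e1 : PySem.Set.equal (PySem.Set.ofList chars) ['?'] = false := by
        rw [Bool.eq_false_iff]; intro h; rw [pv_set_equal_iff] at h
        simpa using (h '1').mp H1
      simp [pvColCharA, pvEmit, e1, ha, ha', H0, H1, HQ] <;> exact ha'
    · -- only '?' occurs: both give '?'
      have e1 : PySem.Set.equal (PySem.Set.ofList chars) ['?'] = true := by
        rw [pv_set_equal_iff]
        intro x
        constructor
        · intro hx
          rcases hK x hx with h | h | h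
          · exact absurd (h ▸ hx) H0
          · exact absurd (h ▸ hx) H1
          · simp [h]
        · intro hx; rcases (by simpa using hx : x = '?') with h <;> subst h <;> assumption
      simp [pvColCharA, pvEmit, e1, ha, ha', H0, H1, HQ] <;> exact ha'
    · -- no '0','1','?' at all: impossible for a nonempty column
      obtain ⟨c, hc⟩ := List.exists_mem_of_ne_nil chars hne
      rcases hK c hc with h | h | h <;> subst h <;> [exact absurd hc H0; exact absurd hc H1;
        exact absurd hc HQ]

-- ===== VERDICT (by name: the statement is the Claim_ definition above) =====
theorem merge_marker_spec : Claim_equal_merge_marker := by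
  intro group taxaname data _hdom _hpre
  unfold Spec_merge_marker merge_marker merge_marker_alt
  rw [pv_foldl_append_map]
  simp only [List.nil_append]
  cases hg : group.map (fun g => pvLook taxaname data g) with
  | nil => simp [pvCols]
  | cons s0 rest =>
    simp only []
    have hfm := List.foldl_map (f := String.toList)
      (g := fun fl (r : List Char) => (fl.zip r).map (fun p => pvUpd p.1 p.2))
      (l := s0 :: rest) (init := List.replicate s0.length (false, false, false, false))
    rw [← hfm]
    rw [pv_flags_fold]
    simp only [List.map_cons, pvCols, List.length_replicate, List.foldl_cons,
      String.length_toList, min_self, List.map_map]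
    apply congrArg
    apply List.map_congr_left
    intro j hj
    have hD : (List.replicate s0.length ((false, false, false, false) : Bool × Bool × Bool × Bool)).getD j (false, false, false, false) = (false, false, false, false) := by
      simp [List.getD_eq_getElem?_getD, List.getElem?_replicate]
      split <;> rfl
    simp only [Function.comp, hD]
    exact pv_colA_eq _ (by simp)
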